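-- pv_equiv track=rewrite | github.com/skyttedk/present-predictor | src/ml/predictor.py | _calculate_employee_stats
-- ===== SOURCE A (Python) =====
-- from typing import List, Dict # Optional is not needed for Python 3.10+ with `| None`
--
-- def _calculate_employee_stats(employees: List[Dict]) -> Dict[str, int]:
--     """Calculate employee gender counts."""
--     gender_counts = {'male': 0, 'female': 0, 'unisex': 0}
--
--     for emp in employees:
--         gender = emp.get('gender', 'unisex').lower()
--         if gender in gender_counts:
--             gender_counts[gender] += 1
--         else:
--             gender_counts['unisex'] += 1
--
--     return gender_counts
-- ===== SOURCE B (Python) =====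
-- from typing import List, Dict
--
-- def _calculate_employee_stats(employees: List[Dict]) -> Dict[str, int]:
--     """Calculate employee gender counts."""
--     def norm(emp):
--         return emp.get('gender', 'unisex').lower()
--     male = len([e for e in employees if norm(e) == 'male'])
--     female = len([e for e in employees if norm(e) == 'female'])
--     return {'male': male, 'female': female, 'unisex': len(employees) - male - female}
-- ===== Notes on version B (the rewrite author's own statement) =====
-- stated objective: alternative
-- what changed: Replaces the single branching pass that mutates a counter dict with two filtered counts (male, female) and a closed form unisex = len(employees) - male - female, capturing the 'everything else is unisex' fallback directly.
import Mathlib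
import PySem

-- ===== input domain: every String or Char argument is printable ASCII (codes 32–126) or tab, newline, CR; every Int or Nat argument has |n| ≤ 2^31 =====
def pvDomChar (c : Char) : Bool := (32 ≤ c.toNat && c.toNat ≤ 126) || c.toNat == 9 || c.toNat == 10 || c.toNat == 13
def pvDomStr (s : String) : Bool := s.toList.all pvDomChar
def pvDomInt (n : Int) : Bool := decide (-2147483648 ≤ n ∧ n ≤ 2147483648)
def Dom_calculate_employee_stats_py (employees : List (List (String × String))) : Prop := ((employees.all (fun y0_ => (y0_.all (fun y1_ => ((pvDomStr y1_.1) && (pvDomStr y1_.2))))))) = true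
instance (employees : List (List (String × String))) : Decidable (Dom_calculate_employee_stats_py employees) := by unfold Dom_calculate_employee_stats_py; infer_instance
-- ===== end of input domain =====

-- B replaces A's single branching pass over a mutated counter dict with two filtered
-- counts and a closed form for the unisex bucket (objective: alternative decomposition).

-- ===== PORT A =====
-- the body of A's for-loop, named so it can be folded over
def pvStepA (gc : PySem.Dict String Int) (emp : List (String × String)) : PySem.Dict String Int :=
  let gender := PySem.Str.lower ((PySem.Dict.mk emp).getD "gender" "unisex")
  if gc.contains gender then gc.modify gender 0 (· + 1)
  else gc.modify "unisex" 0 (· + 1)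

def calculate_employee_stats_py (employees : List (List (String × String))) : List (String × Int) :=
  let gender_counts : PySem.Dict String Int :=
    PySem.Dict.ofList [("male", 0), ("female", 0), ("unisex", 0)]
  (employees.foldl pvStepA gender_counts).items

-- ===== PORT B =====
def pvNormB (emp : List (String × String)) : String :=
  PySem.Str.lower ((PySem.Dict.mk emp).getD "gender" "unisex")

def calculate_employee_stats_py_alt (employees : List (List (String × String))) : List (String × Int) :=
  let male : Int := (employees.filter (fun e => pvNormB e == "male")).length
  let female : Int := (employees.filter (fun e => pvNormB e == "female")).length
  [("male", male), ("female", female), ("unisex", (employees.length : Int) - male - female)]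

-- ===== PRECONDITION & SPEC =====
def Spec_calculate_employee_stats_py (employees : List (List (String × String))) (out : List (String × Int)) : Prop := out = calculate_employee_stats_py_alt employees
instance (employees : List (List (String × String))) (out : List (String × Int)) : Decidable (Spec_calculate_employee_stats_py employees out) := by unfold Spec_calculate_employee_stats_py; infer_instance

-- ===== CLAIM (what is proved, stated in full; the proofs are below) =====
def Claim_equal_calculate_employee_stats_py : Prop := ∀ (employees : List (List (String × String))), Dom_calculate_employee_stats_py employees → Spec_calculate_employee_stats_py employees (calculate_employee_stats_py employees)

-- ===== LEMMAS AND PROOFS =====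

lemma pvStepA_eq (m f u : Int) (x : List (String × String)) :
    pvStepA (PySem.Dict.mk [("male", m), ("female", f), ("unisex", u)]) x =
      PySem.Dict.mk [("male", if pvNormB x = "male" then m + 1 else m),
                     ("female", if pvNormB x = "female" then f + 1 else f),
                     ("unisex", if pvNormB x ≠ "male" ∧ pvNormB x ≠ "female" then u + 1 else u)] := by
  have : pvStepA (PySem.Dict.mk [("male", m), ("female", f), ("unisex", u)]) x =
      if (PySem.Dict.mk [("male", m), ("female", f), ("unisex", u)]).contains (pvNormB x) then
        (PySem.Dict.mk [("male", m), ("female", f), ("unisex", u)]).modify (pvNormB x) 0 (· + 1)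
      else (PySem.Dict.mk [("male", m), ("female", f), ("unisex", u)]).modify "unisex" 0 (· + 1) := rfl
  rw [this]
  by_cases hm : pvNormB x = "male"
  · simp [hm, PySem.Dict.contains, PySem.Dict.modify, PySem.Dict.get?, PySem.Dict.insert, PySem.Dict.getD]
  · by_cases hf : pvNormB x = "female"
    · simp [hf, PySem.Dict.contains, PySem.Dict.modify, PySem.Dict.get?, PySem.Dict.insert,
        PySem.Dict.getD]
    · by_cases hu : pvNormB x = "unisex"
      · simp [hm, hf, hu, PySem.Dict.contains, PySem.Dict.modify,
          PySem.Dict.get?, PySem.Dict.insert, PySem.Dict.getD]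
      · simp [hm, hf, hu, Ne.symm hm, Ne.symm hf, Ne.symm hu, PySem.Dict.contains,
          PySem.Dict.modify, PySem.Dict.get?, PySem.Dict.insert, PySem.Dict.getD]

lemma pv_loop_inv (l : List (List (String × String))) (m f u : Int) :
    l.foldl pvStepA (PySem.Dict.mk [("male", m), ("female", f), ("unisex", u)]) =
    PySem.Dict.mk [("male", m + (l.filter (fun e => pvNormB e == "male")).length),
                   ("female", f + (l.filter (fun e => pvNormB e == "female")).length),
                   ("unisex", u + ((l.length : Int)
                      - (l.filter (fun e => pvNormB e == "male")).length
                      - (l.filter (fun e => pvNormB e == "female")).length))] := by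
  induction l generalizing m f u with
  | nil => simp
  | cons x xs ih =>
    rw [List.foldl_cons, pvStepA_eq, ih]
    simp only [List.filter_cons, List.length_cons]
    by_cases hm : pvNormB x = "male"
    · apply PySem.Dict.ext
      simp [hm] <;> (first | trivial | omega)
    · by_cases hf : pvNormB x = "female"
      · apply PySem.Dict.ext
        simp [hf] <;> (first | trivial | omega)
      · apply PySem.Dict.ext
        simp [hm, hf] <;> (first | trivial | omega)

-- ===== VERDICT (by name: the statement is the Claim_ definition above) =====
theorem calculate_employee_stats_py_spec : Claim_equal_calculate_employee_stats_py := by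
  intro employees _
  show calculate_employee_stats_py employees = calculate_employee_stats_py_alt employees
  show (employees.foldl pvStepA (PySem.Dict.ofList [("male", 0), ("female", 0), ("unisex", 0)])).items
      = calculate_employee_stats_py_alt employees
  rw [show PySem.Dict.ofList [("male", (0:Int)), ("female", 0), ("unisex", 0)]
      = PySem.Dict.mk [("male", 0), ("female", 0), ("unisex", 0)] from by decide]
  rw [pv_loop_inv]
  simp [calculate_employee_stats_py_alt]
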